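-- pv_equiv track=rewrite | github.com/hoiung/hoiboy-uk | scripts/parse_aam_sql.py | unquote_sql
-- ===== SOURCE A (Python) =====
-- from typing import Iterator, List, Optional
--
-- def unquote_sql(tok: str) -> Optional[str]:
--     """Decode a raw mysqldump field token into a Python str (or None)."""
--     if tok is None:
--         return None
--     if tok.upper() == "NULL":
--         return None
--     if len(tok) >= 2 and tok[0] == "'" and tok[-1] == "'":
--         inner = tok[1:-1]
--         # mysqldump escapes: \\ \' \" \n \r \t \0 \Z
--         out: List[str] = []
--         i = 0
--         n = len(inner)
--         esc = {
--             "n": "\n", "r": "\r", "t": "\t", "0": "\x00",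
--             "Z": "\x1a", "\\": "\\", "'": "'", '"': '"',
--         }
--         while i < n:
--             c = inner[i]
--             if c == "\\" and i + 1 < n:
--                 nxt = inner[i + 1]
--                 out.append(esc.get(nxt, nxt))
--                 i += 2
--             else:
--                 out.append(c)
--                 i += 1
--         return "".join(out)
--     # numeric literal
--     return tok
-- ===== SOURCE B (Python) =====
-- from typing import List, Optional
--
-- _ESC = {"n": "\n", "r": "\r", "t": "\t", "0": "\x00",
--         "Z": "\x1a", "\\": "\\", "'": "'", '"': '"'}
--
-- def unquote_sql(tok: str) -> Optional[str]:
--     """Decode a raw mysqldump field token into a Python str (or None)."""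
--     if tok is None:
--         return None
--     if tok.upper() == "NULL":
--         return None
--     if len(tok) >= 2 and tok[0] == "'" and tok[-1] == "'":
--         # split on backslash: every part after the first starts right after an escape
--         parts = tok[1:-1].split("\\")
--         out: List[str] = [parts[0]]
--         i = 1
--         while i < len(parts):
--             p = parts[i]
--             if p == "":
--                 # two adjacent backslashes (escaped backslash) or lone trailing backslash
--                 if i + 1 < len(parts):
--                     out.append("\\" + parts[i + 1])
--                     i += 2
--                 else:
--                     out.append("\\")
--                     i += 1
--             else:
--                 out.append(_ESC.get(p[0], p[0]) + p[1:])
--                 i += 1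
--         return "".join(out)
--     # numeric literal
--     return tok
-- ===== Notes on version B (the rewrite author's own statement) =====
-- stated objective: idiomatic
-- what changed: The per-character while-loop with an index and explicit escape-pair stepping is replaced by splitting the quoted body on backslash once and decoding each part's first character through the escape table.
import Mathlib
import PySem

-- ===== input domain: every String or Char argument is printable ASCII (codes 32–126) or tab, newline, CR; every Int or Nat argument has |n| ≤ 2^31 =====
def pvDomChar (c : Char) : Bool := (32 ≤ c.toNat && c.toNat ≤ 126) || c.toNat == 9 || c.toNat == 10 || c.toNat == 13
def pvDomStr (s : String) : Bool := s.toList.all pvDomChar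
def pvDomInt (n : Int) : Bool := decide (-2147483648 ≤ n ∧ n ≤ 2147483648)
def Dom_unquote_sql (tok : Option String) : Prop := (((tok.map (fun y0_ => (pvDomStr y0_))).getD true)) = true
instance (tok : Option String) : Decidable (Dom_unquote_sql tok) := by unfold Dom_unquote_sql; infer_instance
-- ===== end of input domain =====

-- B decodes the quoted body by splitting on backslash and mapping each piece's first
-- character through the escape table, instead of A's per-character index walk (objective: idiomatic).

-- ===== PORT A =====
-- esc.get(c, c): the mysqldump escape dict, defaulting to the character itself
def escGet (c : Char) : Char :=
  if c = 'n' then '\n'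
  else if c = 'r' then '\r'
  else if c = 't' then '\t'
  else if c = '0' then Char.ofNat 0
  else if c = 'Z' then Char.ofNat 26
  else if c = '\\' then '\\'
  else if c = '\'' then '\''
  else if c = '"' then '"'
  else c

-- A's while-loop over `inner`: index i walks the list; the two branches of the loop body
def decodeA : List Char → List Char
  | [] => []
  | c :: nxt :: rest' =>
    if c = '\\' then escGet nxt :: decodeA rest'     -- i + 1 < n: consume the escape pair
    else c :: decodeA (nxt :: rest')                  -- else branch: append c, i += 1
  | [c] => [c]                                        -- last char: the else branch appends it (even a lone '\\')

def unquote_sql (tok : Option String) : Option String :=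
  match tok with
  | none => none
  | some t =>
    if PySem.Str.upper t = "NULL" then none
    else
      if 2 ≤ t.toList.length ∧ PySem.List.pyGet? t.toList 0 = some '\'' ∧ PySem.List.pyGet? t.toList (-1) = some '\'' then
        some (String.mk (decodeA (PySem.List.slice t.toList (some 1) (some (-1)))))
      else some t

-- ===== PORT B =====
-- B's while-loop over `parts`: each part after the first begins right after a backslash
def procB : List (List Char) → List (List Char)
  | [] => []
  | [] :: rest =>
    match rest with
    | next :: rest' => ('\\' :: next) :: procB rest'  -- escaped backslash: "\\" + parts[i+1]
    | [] => [['\\']]                                   -- lone trailing backslash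
  | (c :: cs) :: rest => (escGet c :: cs) :: procB rest -- _ESC.get(p[0], p[0]) + p[1:]

def unquote_sql_alt (tok : Option String) : Option String :=
  match tok with
  | none => none
  | some t =>
    if PySem.Str.upper t = "NULL" then none
    else
      if 2 ≤ t.toList.length ∧ PySem.List.pyGet? t.toList 0 = some '\'' ∧ PySem.List.pyGet? t.toList (-1) = some '\'' then
        -- inner.split("\\") ported as List.splitOn (exact for a one-char separator)
        some (String.mk (((List.splitOn '\\' (PySem.List.slice t.toList (some 1) (some (-1)))).headD []) ++
          (procB (List.splitOn '\\' (PySem.List.slice t.toList (some 1) (some (-1)))).tail).flatten))  -- "".join(out)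
      else some t

-- ===== PRECONDITION & SPEC =====
def Spec_unquote_sql (tok : Option String) (out : Option String) : Prop := out = unquote_sql_alt tok
instance (tok : Option String) (out : Option String) : Decidable (Spec_unquote_sql tok out) := by unfold Spec_unquote_sql; infer_instance

-- ===== CLAIM (what is proved, stated in full; the proofs are below) =====
def Claim_equal_unquote_sql : Prop := ∀ (tok : Option String), Dom_unquote_sql tok → Spec_unquote_sql tok (unquote_sql tok)

-- ===== LEMMAS AND PROOFS =====
lemma splitOnP_ne_nil (l : List Char) : List.splitOnP (· == '\\') l ≠ [] := by
  induction l with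
  | nil => simp [List.splitOnP_nil]
  | cons c rest ih =>
    rw [List.splitOnP_cons]
    split
    · simp
    · cases h : List.splitOnP (· == '\\') rest with
      | nil => exact absurd h ih
      | cons q qs => simp

lemma decode_eq_split (l : List Char) :
    (List.splitOnP (· == '\\') l).headD [] ++ (procB (List.splitOnP (· == '\\') l).tail).flatten
      = decodeA l := by
  induction l using decodeA.induct with
  | case1 => simp [List.splitOnP_nil, procB, decodeA]
  | case2 nxt rest' ih =>
    rw [List.splitOnP_cons]
    simp only [beq_self_eq_true, if_true, List.headD, List.tail]
    rw [List.splitOnP_cons]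
    by_cases hn : nxt = '\\'
    · subst hn
      simp only [beq_self_eq_true, if_true]
      cases h : List.splitOnP (· == '\\') rest' with
      | nil => exact absurd h (splitOnP_ne_nil rest')
      | cons q qs =>
        rw [h] at ih
        simp only [List.headD, List.tail] at ih
        simp [procB, decodeA, escGet, ← ih]
    · simp only [beq_iff_eq, hn, if_false]
      cases h : List.splitOnP (· == '\\') rest' with
      | nil => exact absurd h (splitOnP_ne_nil rest')
      | cons q qs =>
        rw [h] at ih
        simp only [List.headD, List.tail] at ih
        simp [procB, decodeA, escGet, hn, ← ih]
  | case3 c nxt rest' hc ih =>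
    rw [List.splitOnP_cons]
    simp only [beq_iff_eq, hc, if_false]
    cases h : List.splitOnP (· == '\\') (nxt :: rest') with
    | nil => exact absurd h (splitOnP_ne_nil _)
    | cons q qs =>
      rw [h] at ih
      simp only [List.headD, List.tail] at ih
      cases q with
      | nil => simp [decodeA, hc]; simpa using ih
      | cons q0 qtl => simp [decodeA, hc]; simpa using ih
  | case4 c =>
    by_cases hc : c = '\\'
    · subst hc
      simp [List.splitOnP_cons, List.splitOnP_nil, procB, decodeA]
    · simp [List.splitOnP_cons, List.splitOnP_nil, procB, decodeA, hc]

-- ===== VERDICT (by name: the statement is the Claim_ definition above) =====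
theorem unquote_sql_spec : Claim_equal_unquote_sql := by
  intro tok _
  cases tok with
  | none => rfl
  | some t =>
    show unquote_sql (some t) = unquote_sql_alt (some t)
    simp only [unquote_sql, unquote_sql_alt]
    split_ifs with h1 h2
    · rfl
    · rw [List.splitOn, decode_eq_split]
    · rfl
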